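-- pv_equiv track=rewrite | github.com/kivimedia/choirmind | vocal-service/scoring.py | _octave_num
-- ===== SOURCE A (Python) =====
-- from typing import Optional
--
-- def _octave_num(note_str: Optional[str]) -> Optional[int]:
--     """Extract octave number from note string, e.g. 'A3' -> 3, 'F#4' -> 4."""
--     if not note_str:
--         return None
--     i = len(note_str)
--     while i > 0 and (note_str[i - 1].isdigit() or note_str[i - 1] == '-'):
--         i -= 1
--     try:
--         return int(note_str[i:])
--     except (ValueError, IndexError):
--         return None
-- ===== SOURCE B (Python) =====
-- import re
--
-- _TRAILING_RUN = re.compile(r'[-0-9]+\Z')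
--
-- def _octave_num(note_str):
--     """Extract octave number from note string, e.g. 'A3' -> 3, 'F#4' -> 4."""
--     if not note_str:
--         return None
--     m = _TRAILING_RUN.search(note_str)
--     if m is None:
--         return None
--     try:
--         return int(m.group())
--     except ValueError:
--         return None
-- ===== Notes on version B (the rewrite author's own statement) =====
-- stated objective: idiomatic
-- what changed: Replaced the manual backward index-decrement scan and slice with a precompiled regex search for the maximal trailing [-0-9]+\Z run, keeping int()'s failure behaviour for malformed runs.
import Mathlib
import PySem

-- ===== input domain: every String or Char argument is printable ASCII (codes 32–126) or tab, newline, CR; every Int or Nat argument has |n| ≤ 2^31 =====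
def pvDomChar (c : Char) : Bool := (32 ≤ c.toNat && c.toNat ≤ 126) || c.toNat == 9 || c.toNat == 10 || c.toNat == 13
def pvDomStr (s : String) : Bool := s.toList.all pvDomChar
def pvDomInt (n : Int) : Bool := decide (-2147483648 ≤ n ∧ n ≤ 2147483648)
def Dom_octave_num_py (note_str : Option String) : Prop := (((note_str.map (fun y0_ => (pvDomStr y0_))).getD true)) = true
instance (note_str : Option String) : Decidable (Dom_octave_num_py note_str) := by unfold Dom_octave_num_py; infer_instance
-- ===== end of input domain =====

-- B replaces A's manual backward index scan with a regex search for the maximal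
-- trailing [-0-9]+\Z run (ported as reverse/takeWhile); objective: idiomatic, same cost.

-- ===== PORT A =====
-- while i > 0 and (note_str[i-1].isdigit() or note_str[i-1] == '-'): i -= 1
-- (the index i-1 is always in range inside the loop, so List.getD is exact here)
def pvLoopA (cs : List Char) : Nat → Nat
  | 0 => 0
  | i + 1 =>
    if PySem.Chars.isdigit (cs.getD i ' ') || cs.getD i ' ' == '-' then
      pvLoopA cs i
    else
      i + 1

def octave_num_py (note_str : Option String) : Option Int :=
  match note_str with
  | none => none                                   -- `if not note_str`
  | some s =>
    if s.toList = [] then none                     -- `if not note_str` (empty string)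
    else
      let i := pvLoopA s.toList s.toList.length
      -- int(note_str[i:]); 0 ≤ i ≤ len, so the slice is `drop i` (exact)
      PySem.Int.ofChars? (s.toList.drop i)

-- ===== PORT B =====
-- re.search(r'[-0-9]+\Z', s): the maximal trailing run of chars in the class [-0-9];
-- ported by hand as takeWhile over the reversed code points (exact for this anchored pattern)
def pvRegexTrailingRun (cs : List Char) : List Char :=
  (cs.reverse.takeWhile (fun c => PySem.Chars.isdigit c || c == '-')).reverse

def octave_num_py_alt (note_str : Option String) : Option Int :=
  match note_str with
  | none => none                                   -- `if not note_str`
  | some s =>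
    if s.toList = [] then none
    else
      match pvRegexTrailingRun s.toList with
      | [] => none                                 -- regex found no match (m is None)
      | run => PySem.Int.ofChars? run              -- int(m.group()), None on ValueError

-- ===== PRECONDITION & SPEC =====
def Spec_octave_num_py (note_str : Option String) (out : Option Int) : Prop := out = octave_num_py_alt note_str
instance (note_str : Option String) (out : Option Int) : Decidable (Spec_octave_num_py note_str out) := by unfold Spec_octave_num_py; infer_instance

-- ===== CLAIM (what is proved, stated in full; the proofs are below) =====
def Claim_equal_octave_num_py : Prop := ∀ (note_str : Option String), Dom_octave_num_py note_str → Spec_octave_num_py note_str (octave_num_py note_str)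

-- ===== LEMMAS AND PROOFS =====

theorem pvLoopA_le (cs : List Char) : ∀ i, pvLoopA cs i ≤ i := by
  intro i
  induction i with
  | zero => simp [pvLoopA]
  | succ n ih =>
    simp only [pvLoopA]
    split
    · omega
    · omega

theorem pvLoopA_append (cs : List Char) (c : Char) :
    ∀ i, i ≤ cs.length → pvLoopA (cs ++ [c]) i = pvLoopA cs i := by
  intro i
  induction i with
  | zero => intro _; rfl
  | succ n ih =>
    intro h
    have hn : n < cs.length := by omega
    simp only [pvLoopA, List.getD_append _ _ _ _ hn]
    split
    · exact ih (by omega)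
    · rfl

theorem pvLoopA_run (cs : List Char) :
    cs.drop (pvLoopA cs cs.length) = pvRegexTrailingRun cs := by
  induction cs using List.reverseRecOn with
  | nil => rfl
  | append_singleton ys c ih =>
    have hlen : (ys ++ [c]).length = ys.length + 1 := by simp
    rw [hlen]
    simp only [pvLoopA]
    have hget : (ys ++ [c]).getD ys.length ' ' = c := by
      simp
    rw [hget]
    by_cases hp : (PySem.Chars.isdigit c || c == '-') = true
    · rw [if_pos hp, pvLoopA_append ys c ys.length (le_refl _)]
      have hle := pvLoopA_le ys ys.length
      rw [List.drop_append_of_le_length hle, ih]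
      simp [pvRegexTrailingRun, hp]
    · rw [if_neg hp]
      have : (ys ++ [c]).drop (ys.length + 1) = [] := by
        apply List.drop_eq_nil_of_le
        omega
      rw [this]
      simp only [pvRegexTrailingRun, List.reverse_append, List.reverse_singleton,
        List.singleton_append, List.takeWhile_cons]
      rw [Bool.not_eq_true] at hp
      simp [hp]

theorem ofChars_nil : PySem.Int.ofChars? ([] : List Char) = none := by decide

-- ===== VERDICT (by name: the statement is the Claim_ definition above) =====
theorem octave_num_py_spec : Claim_equal_octave_num_py := by
  intro note_str _
  unfold Spec_octave_num_py octave_num_py octave_num_py_alt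
  match note_str with
  | none => rfl
  | some s =>
    by_cases hs : s.toList = []
    · simp [hs]
    · simp only [if_neg hs]
      rw [pvLoopA_run]
      match h : pvRegexTrailingRun s.toList with
      | [] => exact ofChars_nil
      | r :: rs => rfl
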